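-- pv_equiv track=rewrite | github.com/Levi-Ramirez/search_engine | mileStone1.py | token_locator
-- ===== SOURCE A (Python) =====
-- def token_locator(tokens):
--     '''this function returns a dictionary of words with a list of the indexes where it the word is'''
--     token_locs = {}
--     i = 0
--     for token in tokens:
--         if not token:
--             continue
--         if token in token_locs:
--             token_locs[token].append(i)
--         else:
--             token_locs[token] = [i]
--         i += 1
--
--     return token_locs
-- ===== SOURCE B (Python) =====
-- def token_locator(tokens):
--     '''this function returns a dictionary of words with a list of the indexes where it the word is'''
--     filtered = [t for t in tokens if t]
--     order = list(dict.fromkeys(filtered))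
--     return {t: [i for i, x in enumerate(filtered) if x == t] for t in order}
-- ===== Notes on version B (the rewrite author's own statement) =====
-- stated objective: alternative
-- what changed: Instead of one fused loop that maintains a manual counter and grows per-token lists in a dict, B first computes the ordered distinct tokens (dict.fromkeys) and then builds each token's full index list by a per-token scan of the filtered sequence; it trades the incremental grouping pass for distinct-keys + per-key index collection.
import Mathlib
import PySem

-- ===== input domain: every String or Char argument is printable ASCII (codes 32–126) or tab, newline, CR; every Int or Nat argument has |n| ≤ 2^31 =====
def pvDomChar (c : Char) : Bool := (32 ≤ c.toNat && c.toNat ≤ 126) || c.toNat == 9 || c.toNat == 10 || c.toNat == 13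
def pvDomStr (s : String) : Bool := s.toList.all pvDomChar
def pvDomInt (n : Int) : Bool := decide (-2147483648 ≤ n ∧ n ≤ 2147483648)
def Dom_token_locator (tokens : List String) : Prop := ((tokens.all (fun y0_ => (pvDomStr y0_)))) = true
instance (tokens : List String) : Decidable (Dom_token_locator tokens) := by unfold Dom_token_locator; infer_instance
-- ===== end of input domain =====

-- B replaces A's fused grouping loop (manual counter + dict of growing lists) by a
-- different algorithm: ordered distinct tokens first, then a per-token index scan.


-- ===== PORT A =====
-- one fused loop: skip falsy tokens, branch on membership, hand-advance the counter i
def token_locator (tokens : List String) : List (String × List Int) :=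
  (tokens.foldl
    (fun (st : PySem.Dict String (List Int) × Int) token =>
      if token = "" then st            -- 'if not token: continue'
      else if st.1.contains token then
        (st.1.modify token [] (fun l => l ++ [st.2]), st.2 + 1)   -- token_locs[token].append(i)
      else
        (st.1.insert token [st.2], st.2 + 1)                      -- token_locs[token] = [i]
    ) (PySem.Dict.empty, 0)).1.items

-- ===== PORT B =====
-- distinct tokens in first-occurrence order, then one index-collecting scan per token
def token_locator_alt (tokens : List String) : List (String × List Int) :=
  let filtered := tokens.filter (fun t => t ≠ "")            -- [t for t in tokens if t]
  let order := PySem.List.dedup filtered                     -- list(dict.fromkeys(filtered))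
  order.map (fun t =>
    (t, ((PySem.List.enumerate filtered 0).filter (fun p => p.2 == t)).map (·.1)))
      -- {t: [i for i, x in enumerate(filtered) if x == t] for t in order}

-- ===== PRECONDITION & SPEC =====
def Spec_token_locator (tokens : List String) (out : List (String × List Int)) : Prop := out = token_locator_alt tokens
instance (tokens : List String) (out : List (String × List Int)) : Decidable (Spec_token_locator tokens out) := by unfold Spec_token_locator; infer_instance

-- ===== CLAIM (what is proved, stated in full; the proofs are below) =====
def Claim_equal_token_locator : Prop := ∀ (tokens : List String), Dom_token_locator tokens → Spec_token_locator tokens (token_locator tokens)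

-- ===== LEMMAS AND PROOFS =====

-- A's fused loop equals the grouping fold over the enumerated filtered list
theorem token_locator_fold_eq (tokens : List String) :
    ∀ (d : PySem.Dict String (List Int)) (n : Int),
      (tokens.foldl
        (fun (st : PySem.Dict String (List Int) × Int) token =>
          if token = "" then st
          else if st.1.contains token then
            (st.1.modify token [] (fun l => l ++ [st.2]), st.2 + 1)
          else
            (st.1.insert token [st.2], st.2 + 1)) (d, n)).1
      = (PySem.List.enumerate (tokens.filter (fun t => t ≠ "")) n).foldl
          (fun (d : PySem.Dict String (List Int)) p =>
            d.modify p.2 [] (fun l => l ++ [p.1])) d := by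
  induction tokens with
  | nil => intro d n; rfl
  | cons t ts ih =>
    intro d n
    by_cases ht : t = ""
    · simp [ht, List.foldl, ih]
    · have hstep :
        (if d.contains t then (d.modify t [] (fun l => l ++ [n]), n + 1)
         else (d.insert t [n], n + 1))
        = (d.modify t [] (fun l => l ++ [n]), n + 1) := by
        by_cases hc : d.contains t
        · simp [hc]
        · simp only [Bool.not_eq_true] at hc
          simp [hc, PySem.Dict.modify, PySem.Dict.getD_of_not_contains d [] hc]
      simp only [List.filter_cons, ht, decide_not, List.foldl_cons]
      rw [hstep]
      simp [ih]

-- ===== VERDICT (by name: the statement is the Claim_ definition above) =====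
theorem token_locator_spec : Claim_equal_token_locator := by
  intro tokens _
  unfold Spec_token_locator token_locator token_locator_alt
  rw [token_locator_fold_eq]
  set L := tokens.filter (fun t => t ≠ "") with hL
  set e := PySem.List.enumerate L 0 with he
  -- the grouping fold, described via its keys and lookups
  set D := e.foldl (fun (d : PySem.Dict String (List Int)) p =>
    d.modify p.2 [] (fun l => l ++ [p.1])) PySem.Dict.empty with hD
  have hnd : D.keys.Nodup := by
    have := PySem.Dict.nodup_keys_foldl_modify_key e (fun p => p.2)
      [] (fun d p l => l ++ [p.1]) PySem.Dict.empty (by simp)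
    simpa [hD] using this
  have hmap : e.map (fun p => p.2) = L := by
    rw [he]; exact PySem.List.map_snd_enumerate L 0
  have hkeys : D.keys = PySem.Set.update [] L := by
    have := PySem.Dict.keys_foldl_modify_key e (fun p => p.2)
      [] (fun d p l => l ++ [p.1]) PySem.Dict.empty
    simpa [hD, hmap] using this
  rw [PySem.Dict.items_eq_map_keys D hnd [], hkeys,
    (rfl : PySem.Set.update [] L = PySem.List.dedup L)]
  apply List.map_congr_left
  intro t _
  have hswap : D = (e.map Prod.swap).foldl
      (fun (d : PySem.Dict String (List Int)) p =>
        d.modify p.1 [] (fun l => l ++ [p.2])) PySem.Dict.empty := by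
    simp [hD, List.foldl_map, Prod.swap]
  have hget : D.getD t [] = ((e.map Prod.swap).filter (fun p => p.1 == t)).map (·.2) := by
    rw [hswap, PySem.Dict.getD_foldl_modify_append]
    simp
  rw [hget]
  simp [List.filter_map, List.map_map, Function.comp_def, Prod.swap, ← he]
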